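-- pv_equiv track=rewrite | github.com/Novanoid2/Random | C/stare stenia python/webshop.py | processOrder
-- ===== SOURCE A (Python) =====
-- def getIndexInList(phone, productList):
--     if phone in productList:
--         pos = productList.index(phone)
--         return pos
--     else:
--         return -1
--
-- def processOrder(listOfPhones, productList, stock, priceList):
--     total = 0
--     for i in listOfPhones:
--         if i in productList:
--             pos = getIndexInList(i, productList)
--             if stock[pos] > 0:
--                 total += priceList[pos]
--                 stock[pos] = stock[pos] -1
--             elif stock[pos] == 0:
--                 total = total
--
--         else:
--             total = total
--     return total
-- ===== SOURCE B (Python) =====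
-- def processOrder(listOfPhones, productList, stock, priceList):
--     # Count-then-summarize: frequency table of orders + first-index map of products,
--     # one pass over the products instead of a lookup per order.
--     # NOTE: unlike A, this does not mutate `stock` (return-value equivalence only).
--     counts = {}
--     for p in listOfPhones:
--         counts[p] = counts.get(p, 0) + 1
--     firstIdx = {}
--     for j, name in enumerate(productList):
--         if name not in firstIdx:
--             firstIdx[name] = j
--     total = 0
--     for name, idx in firstIdx.items():
--         c = counts.get(name, 0)
--         if c > 0 and stock[idx] > 0:
--             total += priceList[idx] * min(c, stock[idx])
--     return total
-- ===== Notes on version B (the rewrite author's own statement) =====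
-- stated objective: faster
-- what changed: B builds a frequency table of the orders and a name-to-first-index map of the products once, then makes a single pass over the distinct products adding priceList[idx]*min(count, stock[idx]), replacing A's per-order membership test and productList.index scan; B does not mutate stock (return-value equivalence).
import Mathlib
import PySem

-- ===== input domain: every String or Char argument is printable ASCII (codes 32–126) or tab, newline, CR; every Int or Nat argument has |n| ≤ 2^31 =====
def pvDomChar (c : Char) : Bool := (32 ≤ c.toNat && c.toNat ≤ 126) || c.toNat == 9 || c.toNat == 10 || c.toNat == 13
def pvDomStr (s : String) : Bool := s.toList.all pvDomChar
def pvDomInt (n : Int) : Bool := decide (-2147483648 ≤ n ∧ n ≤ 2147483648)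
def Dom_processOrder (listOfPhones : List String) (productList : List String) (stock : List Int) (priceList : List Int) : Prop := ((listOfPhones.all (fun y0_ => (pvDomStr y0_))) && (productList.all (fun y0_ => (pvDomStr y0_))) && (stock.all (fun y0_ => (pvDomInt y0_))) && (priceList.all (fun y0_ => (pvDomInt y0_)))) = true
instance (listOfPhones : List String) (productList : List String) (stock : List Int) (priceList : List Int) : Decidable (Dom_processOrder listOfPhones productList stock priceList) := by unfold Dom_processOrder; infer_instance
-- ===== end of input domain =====

-- B replaces A's per-order lookup-and-decrement loop by a count-then-summarize pass
-- (order frequency table + name→first-index map); equivalence is about the RETURN value only: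
-- A decrements `stock` in place, B does not mutate it.

-- ===== PORT A =====
def getIndexInList (phone : String) (productList : List String) : Int :=
  if productList.contains phone then
    -- `productList.index(phone)` cannot raise here (membership guarded); the `none` branch is dead
    match PySem.List.index? productList phone with
    | some p => (p : Int)
    | none => -1
  else -1

def processOrder (listOfPhones : List String) (productList : List String) (stock : List Int) (priceList : List Int) : Int :=
  (listOfPhones.foldl (fun (st : Int × List Int) i =>
      if productList.contains i then
        let pos := getIndexInList i productList
        let sv := PySem.List.pyGetD st.2 pos 0        -- stock[pos]; in range under Pre_
        if sv > 0 then
          (st.1 + PySem.List.pyGetD priceList pos 0,  -- priceList[pos]; in range under Pre_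
           PySem.List.pySetD st.2 pos (sv - 1))       -- stock[pos] = stock[pos] - 1
        else st                                       -- elif stock[pos] == 0 (and negative): total unchanged
      else st)
    (0, stock)).1

-- ===== PORT B =====
def processOrder_alt (listOfPhones : List String) (productList : List String) (stock : List Int) (priceList : List Int) : Int :=
  let counts : PySem.Dict String Int :=
    listOfPhones.foldl (fun d p => d.insert p (d.getD p 0 + 1)) PySem.Dict.empty
  let firstIdx : PySem.Dict String Int :=
    (PySem.List.enumerate productList 0).foldl
      (fun d jn => if ¬ d.contains jn.2 then d.insert jn.2 jn.1 else d) PySem.Dict.empty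
  firstIdx.items.foldl (fun total p =>
      let c := counts.getD p.1 0
      if c > 0 ∧ PySem.List.pyGetD stock p.2 0 > 0 then
        total + PySem.List.pyGetD priceList p.2 0 * min c (PySem.List.pyGetD stock p.2 0)
      else total) 0

-- ===== PRECONDITION & SPEC =====
-- Pre_ excludes exactly the inputs where the Python A raises IndexError: some ordered phone's
-- first index in productList is out of range for stock, or its stock entry is positive and the
-- index is out of range for priceList. (B raises on exactly the same inputs.)
def Pre_processOrder (listOfPhones : List String) (productList : List String) (stock : List Int) (priceList : List Int) : Prop :=
  ∀ i ∈ listOfPhones, i ∈ productList →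
    (PySem.List.index? productList i).getD 0 < stock.length ∧
    (0 < stock.getD ((PySem.List.index? productList i).getD 0) 0 →
      (PySem.List.index? productList i).getD 0 < priceList.length)
instance (listOfPhones : List String) (productList : List String) (stock : List Int) (priceList : List Int) : Decidable (Pre_processOrder listOfPhones productList stock priceList) := by unfold Pre_processOrder; infer_instance

def pvWitness_processOrder : List String × List String × List Int × List Int :=
  (["a", "b", "a"], ["b", "a"], [1, 2], [10, 7])

def Spec_processOrder (listOfPhones : List String) (productList : List String) (stock : List Int) (priceList : List Int) (out : Int) : Prop := out = processOrder_alt listOfPhones productList stock priceList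
instance (listOfPhones : List String) (productList : List String) (stock : List Int) (priceList : List Int) (out : Int) : Decidable (Spec_processOrder listOfPhones productList stock priceList out) := by unfold Spec_processOrder; infer_instance

-- ===== CLAIM (what is proved, stated in full; the proofs are below) =====
def Claim_equal_processOrder : Prop := ∀ (listOfPhones : List String) (productList : List String) (stock : List Int) (priceList : List Int), Dom_processOrder listOfPhones productList stock priceList → Pre_processOrder listOfPhones productList stock priceList → Spec_processOrder listOfPhones productList stock priceList (processOrder listOfPhones productList stock priceList)

-- ===== LEMMAS AND PROOFS =====

-- the name→first-index dict B builds (definitionally the fold in processOrder_alt)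
def pvFI (pl : List String) : PySem.Dict String Int :=
  (PySem.List.enumerate pl 0).foldl
    (fun d jn => if ¬ d.contains jn.2 then d.insert jn.2 jn.1 else d) PySem.Dict.empty

-- the per-product contribution to the total: price[idx] * min(count, max(stock[idx],0))
def pvTerm (priceList stock : List Int) (L : List String) (p : String × Int) : Int :=
  PySem.List.pyGetD priceList p.2 0 *
    min ((L.count p.1 : Int)) (max (PySem.List.pyGetD stock p.2 0) 0)

lemma pvFI_get_gen (pl : List String) (s : Int) (d : PySem.Dict String Int) (name : String) :
    ((PySem.List.enumerate pl s).foldl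
      (fun d jn => if ¬ d.contains jn.2 then d.insert jn.2 jn.1 else d) d).get? name =
    if d.contains name then d.get? name
    else (PySem.List.index? pl name).map (fun k => s + (k : Int)) := by
  induction pl generalizing s d with
  | nil =>
      simp only [PySem.List.enumerate_nil, List.foldl_nil]
      by_cases hcn : d.contains name = true
      · simp [hcn]
      · rw [if_neg (by simp [hcn]), (PySem.List.index?_eq_none_iff [] name).mpr (by simp)]
        simp [(PySem.Dict.get?_eq_none_iff_contains d name).mpr (by simp [hcn])]
  | cons x xs ih =>
      rw [PySem.List.enumerate_cons]
      simp only [List.foldl_cons]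
      by_cases hcx : d.contains x = true
      · have hstep : (if ¬ d.contains x then d.insert x s else d) = d := by simp [hcx]
        rw [hstep, ih]
        by_cases hcn : d.contains name = true
        · simp [hcn]
        · rw [if_neg (by simp [hcn]), if_neg (by simp [hcn])]
          have hne : x ≠ name := fun h => by rw [h] at hcx; simp [hcx] at hcn
          rw [PySem.List.index?_cons_of_ne xs hne]
          cases hidx : PySem.List.index? xs name with
          | none => simp
          | some k => simp; omega
      · have hstep : (if ¬ d.contains x then d.insert x s else d) = d.insert x s := by
          simp [hcx]
        rw [hstep, ih]
        by_cases hname : name = x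
        · subst hname
          rw [if_pos (by simp [PySem.Dict.contains_insert_self]),
              PySem.Dict.get?_insert_self, if_neg (by simp [hcx]),
              PySem.List.index?_cons_self]
          simp
        · have h1 : (d.insert x s).contains name = d.contains name := by
            rw [PySem.Dict.contains_insert]; simp [hname]
          rw [h1, PySem.Dict.get?_insert_of_ne d s hname]
          by_cases hcn : d.contains name = true
          · simp [hcn]
          · rw [if_neg (by simp [hcn]), if_neg (by simp [hcn]),
                PySem.List.index?_cons_of_ne xs (Ne.symm hname)]
            cases hidx : PySem.List.index? xs name with
            | none => simp
            | some k => simp; omega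

lemma pvFI_get (pl : List String) (name : String) :
    (pvFI pl).get? name = (PySem.List.index? pl name).map (fun k => (k : Int)) := by
  rw [pvFI, pvFI_get_gen, if_neg (by simp [PySem.Dict.contains_empty])]
  cases PySem.List.index? pl name <;> simp

lemma pvFI_nodup_gen (pl : List String) (s : Int) (d : PySem.Dict String Int)
    (h : d.keys.Nodup) :
    ((PySem.List.enumerate pl s).foldl
      (fun d jn => if ¬ d.contains jn.2 then d.insert jn.2 jn.1 else d) d).keys.Nodup := by
  induction pl generalizing s d with
  | nil => simpa [PySem.List.enumerate_nil] using h
  | cons x xs ih =>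
      rw [PySem.List.enumerate_cons]
      simp only [List.foldl_cons]
      by_cases hcx : d.contains x = true
      · have hstep : (if ¬ d.contains x then d.insert x s else d) = d := by simp [hcx]
        rw [hstep]; exact ih _ _ h
      · have hstep : (if ¬ d.contains x then d.insert x s else d) = d.insert x s := by
          simp [hcx]
        rw [hstep]; exact ih _ _ (PySem.Dict.nodup_keys_insert d x s h)

lemma pvFI_nodup (pl : List String) : (pvFI pl).keys.Nodup :=
  pvFI_nodup_gen pl 0 PySem.Dict.empty PySem.Dict.nodup_keys_empty

lemma pvFI_fst_nodup (pl : List String) : ((pvFI pl).items.map (·.1)).Nodup :=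
  pvFI_nodup pl

-- every item of pvFI is (name, first index of name), with the index in range
lemma pvFI_items_spec (pl : List String) (p : String × Int) (hp : p ∈ (pvFI pl).items) :
    ∃ k : Nat, PySem.List.index? pl p.1 = some k ∧ p.2 = (k : Int) ∧
      ∃ hk : k < pl.length, pl[k] = p.1 := by
  obtain ⟨name, idx⟩ := p
  have hg : (pvFI pl).get? name = some idx :=
    PySem.Dict.get?_of_mem_items (pvFI pl) hp (pvFI_nodup pl)
  rw [pvFI_get] at hg
  cases hidx : PySem.List.index? pl name with
  | none => rw [hidx] at hg; simp at hg
  | some k =>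
      rw [hidx] at hg
      simp at hg
      obtain ⟨hk, hval, -⟩ := PySem.List.getElem_of_index?_eq_some hidx
      exact ⟨k, rfl, hg.symm, hk, hval⟩

lemma pvFI_mem_of_mem_items (pl : List String) (p : String × Int)
    (hp : p ∈ (pvFI pl).items) : p.1 ∈ pl := by
  obtain ⟨k, hidx, -, -⟩ := pvFI_items_spec pl p hp
  exact (PySem.List.index?_isSome_iff pl p.1).mp (by rw [hidx]; rfl)

-- the unique item of pvFI whose key is i
lemma pvFI_item_eq (pl : List String) (p : String × Int) (hp : p ∈ (pvFI pl).items)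
    (i : String) (pos : Nat) (hidx : PySem.List.index? pl i = some pos)
    (h1 : p.1 = i) : p = (i, (pos : Int)) := by
  obtain ⟨name, idx⟩ := p
  have hg : (pvFI pl).get? name = some idx :=
    PySem.Dict.get?_of_mem_items (pvFI pl) hp (pvFI_nodup pl)
  simp only at h1
  subst h1
  rw [pvFI_get, hidx] at hg
  simp at hg
  rw [← hg]

-- a fold whose step adds h p to the accumulator is a sum
lemma pv_foldl_step (F : Int → (String × Int) → Int) (h : (String × Int) → Int)
    (hF : ∀ t p, F t p = t + h p) (l : List (String × Int)) (a : Int) :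
    l.foldl F a = a + (l.map h).sum := by
  induction l generalizing a with
  | nil => simp
  | cons x xs ih => simp only [List.foldl_cons, List.map_cons, List.sum_cons, ih, hF]; ring

-- summing a map where exactly the entry with first component e.1 gains c
lemma pv_sum_map_split (l : List (String × Int)) (e : String × Int)
    (hnd : (l.map (·.1)).Nodup) (he : e ∈ l) (f g : String × Int → Int) (c : Int)
    (hfe : f e = c + g e) (hrest : ∀ p ∈ l, p.1 ≠ e.1 → f p = g p) :
    (l.map f).sum = c + (l.map g).sum := by
  induction l with
  | nil => simp at he
  | cons a l ih =>
      simp only [List.map_cons, List.nodup_cons] at hnd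
      rcases List.mem_cons.mp he with h | h
      · subst h
        have hmap : l.map f = l.map g := by
          apply List.map_congr_left
          intro p hp
          refine hrest p (List.mem_cons_of_mem _ hp) ?_
          intro hp1
          exact hnd.1 (by rw [← hp1]; exact List.mem_map_of_mem hp)
        simp only [List.map_cons, List.sum_cons, hfe, hmap]; ring
      · have hane : a.1 ≠ e.1 := fun hae =>
          hnd.1 (by rw [hae]; exact List.mem_map_of_mem h)
        rw [List.map_cons, List.map_cons, List.sum_cons, List.sum_cons,
            hrest a List.mem_cons_self hane,
            ih hnd.2 h (fun p hp hne => hrest p (List.mem_cons_of_mem _ hp) hne)]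
        ring

-- B's result is the sum of pvTerm over pvFI's items
lemma pvB_eq_sum (listOfPhones productList : List String) (stock priceList : List Int) :
    processOrder_alt listOfPhones productList stock priceList
      = ((pvFI productList).items.map (pvTerm priceList stock listOfPhones)).sum := by
  unfold processOrder_alt
  dsimp only
  rw [pv_foldl_step _
      (fun p =>
        if ((listOfPhones.foldl (fun d p => d.insert p (d.getD p 0 + 1)) PySem.Dict.empty : PySem.Dict String Int)).getD p.1 0 > 0
              ∧ PySem.List.pyGetD stock p.2 0 > 0 then
          PySem.List.pyGetD priceList p.2 0 *
            min (((listOfPhones.foldl (fun d p => d.insert p (d.getD p 0 + 1)) PySem.Dict.empty : PySem.Dict String Int)).getD p.1 0)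
              (PySem.List.pyGetD stock p.2 0)
        else 0)
      (by
        intro t p
        dsimp only
        by_cases h : ((listOfPhones.foldl (fun d p => d.insert p (d.getD p 0 + 1)) PySem.Dict.empty : PySem.Dict String Int)).getD p.1 0 > 0
              ∧ PySem.List.pyGetD stock p.2 0 > 0
        · rw [if_pos h, if_pos h]
        · rw [if_neg h, if_neg h, add_zero]), zero_add]
  refine congrArg List.sum (List.map_congr_left ?_)
  intro p _
  simp only [PySem.Dict.getD_foldl_insert_add_one, PySem.Dict.getD_empty, zero_add]
  have hcnn : (0 : Int) ≤ (listOfPhones.count p.1 : Int) := Int.natCast_nonneg _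
  unfold pvTerm
  by_cases h : (listOfPhones.count p.1 : Int) > 0 ∧ PySem.List.pyGetD stock p.2 0 > 0
  · rw [if_pos h, max_eq_left (le_of_lt h.2)]
  · rw [if_neg h]
    have hm : min ((listOfPhones.count p.1 : Int)) (max (PySem.List.pyGetD stock p.2 0) 0) = 0 := by
      rcases not_and_or.mp h with h1 | h2
      · have hz : (listOfPhones.count p.1 : Int) = 0 := by omega
        rw [hz]; exact min_eq_left (le_max_right _ _)
      · have hz : max (PySem.List.pyGetD stock p.2 0) 0 = 0 := by omega
        rw [hz]; exact min_eq_right hcnn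
    rw [hm, mul_zero]

-- main invariant for A's loop: the running total grows by the sum of pvTerm over the products
lemma pvA_loop (productList : List String) (priceList : List Int) :
    ∀ (L : List String) (t : Int) (st : List Int),
    (∀ i ∈ L, i ∈ productList →
      (PySem.List.index? productList i).getD 0 < st.length ∧
      (0 < st.getD ((PySem.List.index? productList i).getD 0) 0 →
        (PySem.List.index? productList i).getD 0 < priceList.length)) →
    (L.foldl (fun (st : Int × List Int) i =>
      if productList.contains i then
        let pos := getIndexInList i productList
        let sv := PySem.List.pyGetD st.2 pos 0
        if sv > 0 then
          (st.1 + PySem.List.pyGetD priceList pos 0, PySem.List.pySetD st.2 pos (sv - 1))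
        else st
      else st) (t, st)).1
      = t + ((pvFI productList).items.map (pvTerm priceList st L)).sum := by
  set f := (fun (st : Int × List Int) (i : String) =>
      if productList.contains i then
        let pos := getIndexInList i productList
        let sv := PySem.List.pyGetD st.2 pos 0
        if sv > 0 then
          (st.1 + PySem.List.pyGetD priceList pos 0, PySem.List.pySetD st.2 pos (sv - 1))
        else st
      else st) with hf
  intro L
  induction L with
  | nil =>
      intro t st _
      rw [List.foldl_nil, List.sum_eq_zero, add_zero]
      intro x hx
      obtain ⟨p, hp, rfl⟩ := List.mem_map.mp hx
      unfold pvTerm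
      rw [List.count_nil, Nat.cast_zero, min_eq_left (le_max_right _ _), mul_zero]
  | cons i L ih =>
      intro t st H
      rw [List.foldl_cons]
      by_cases hmem : i ∈ productList
      · have hci : productList.contains i = true := by
          simpa [List.contains_iff_mem] using hmem
        obtain ⟨pos, hidx⟩ := Option.isSome_iff_exists.mp
          ((PySem.List.index?_isSome_iff productList i).mpr hmem)
        have hgi : getIndexInList i productList = (pos : Int) := by
          unfold getIndexInList
          rw [if_pos hci, hidx]
        have hHi := H i List.mem_cons_self hmem
        rw [hidx] at hHi
        simp only [Option.getD_some] at hHi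
        have hsv : PySem.List.pyGetD st ((pos : Nat) : Int) 0 = st.getD pos 0 :=
          PySem.List.pyGetD_natCast st pos 0
        by_cases hs : 0 < st.getD pos 0
        · -- in stock: pay the price, decrement
          have hstep : f (t, st) i
              = (t + PySem.List.pyGetD priceList ((pos : Nat) : Int) 0,
                 st.set pos (st.getD pos 0 - 1)) := by
            rw [hf]
            dsimp only
            rw [if_pos hci, hgi, hsv, if_pos hs, PySem.List.pySetD_natCast]
          rw [hstep, ih _ _ ?_]
          · -- rearrange the sums
            have hsplit := pv_sum_map_split ((pvFI productList).items) (i, (pos : Int))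
              (pvFI_fst_nodup productList)
              (PySem.Dict.mem_items_of_get?_eq_some (pvFI productList)
                (by rw [pvFI_get, hidx]; rfl))
              (pvTerm priceList st (i :: L))
              (pvTerm priceList (st.set pos (st.getD pos 0 - 1)) L)
              (PySem.List.pyGetD priceList ((pos : Nat) : Int) 0)
              ?_ ?_
            · rw [hsplit]; ring
            · -- the entry for i itself
              unfold pvTerm
              simp only [hsv, List.count_cons_self]
              have hst' : PySem.List.pyGetD (st.set pos (st.getD pos 0 - 1)) ((pos : Nat) : Int) 0
                  = st.getD pos 0 - 1 := by
                rw [PySem.List.pyGetD_natCast, List.getD_eq_getElem?_getD, List.getElem?_set]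
                simp [hHi.1]
              rw [hst']
              have hmin : min (((L.count i : Nat) : Int) + 1) (max (st.getD pos 0) 0)
                  = 1 + min ((L.count i : Nat) : Int) (max (st.getD pos 0 - 1) 0) := by omega
              push_cast
              push_cast at hmin
              rw [hmin]
              ring
            · -- every other entry is untouched
              intro p hp hne
              obtain ⟨k, hkidx, hk2, hklt, hkval⟩ := pvFI_items_spec productList p hp
              have hkpos : k ≠ pos := by
                intro hkp
                apply hne
                subst hkp
                obtain ⟨hplt, hpval, -⟩ := PySem.List.getElem_of_index?_eq_some hidx
                exact hkval.symm.trans hpval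
              have hne' : i ≠ p.1 := fun h => hne h.symm
              unfold pvTerm
              rw [hk2, List.count_cons_of_ne hne']
              simp only [PySem.List.pyGetD_natCast, List.getD_eq_getElem?_getD,
                List.getElem?_set, if_neg (show ¬ pos = k from fun h => hkpos h.symm)]
          · -- the precondition is maintained on the updated stock
            intro j hj hjmem
            obtain ⟨hjl, hjp⟩ := H j (List.mem_cons_of_mem _ hj) hjmem
            refine ⟨by simpa using hjl, ?_⟩
            set q := (PySem.List.index? productList j).getD 0 with hq
            intro hq0
            apply hjp
            by_cases hqp : q = pos
            · exact hqp ▸ hs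
            · rw [List.getD_eq_getElem?_getD, List.getElem?_set,
                  if_neg (fun h => hqp h.symm)] at hq0
              rw [List.getD_eq_getElem?_getD]
              exact hq0
        · -- out of stock (zero or negative): nothing happens
          have hstep : f (t, st) i = (t, st) := by
            rw [hf]
            dsimp only
            rw [if_pos hci, hgi, hsv, if_neg hs]
          rw [hstep, ih _ _ (fun j hj => H j (List.mem_cons_of_mem _ hj))]
          congr 1
          refine congrArg List.sum (List.map_congr_left ?_)
          intro p hp
          by_cases hp1 : p.1 = i
          · have hpe := pvFI_item_eq productList p hp i pos hidx hp1
            rw [hpe]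
            unfold pvTerm
            simp only [hsv, List.count_cons_self]
            have hmax : max (st.getD pos 0) 0 = 0 := by omega
            rw [hmax]
            have hmm : min (((L.count i : Nat) : Int) + 1) 0 = min ((L.count i : Nat) : Int) 0 := by
              omega
            push_cast
            push_cast at hmm
            rw [hmm]
          · unfold pvTerm
            rw [List.count_cons_of_ne (fun h => hp1 h.symm)]
      · -- phone not in the product list: skipped
        have hstep : f (t, st) i = (t, st) := by
          rw [hf]
          dsimp only
          rw [if_neg (by simpa [List.contains_iff_mem] using hmem)]
        rw [hstep, ih _ _ (fun j hj => H j (List.mem_cons_of_mem _ hj))]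
        congr 1
        refine congrArg List.sum (List.map_congr_left ?_)
        intro p hp
        have hp1 : p.1 ≠ i := fun h =>
          hmem (h ▸ pvFI_mem_of_mem_items productList p hp)
        unfold pvTerm
        rw [List.count_cons_of_ne (fun h => hp1 h.symm)]

-- ===== VERDICT (by name: the statement is the Claim_ definition above) =====
theorem processOrder_spec : Claim_equal_processOrder := by
  intro listOfPhones productList stock priceList _ hpre
  unfold Spec_processOrder
  rw [pvB_eq_sum, processOrder, pvA_loop productList priceList listOfPhones 0 stock hpre, zero_add]
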